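-- pv_equiv track=rewrite | github.com/AleksiKnuutila/protato | process_rams_data.py | get_trigger_sentence
-- ===== SOURCE A (Python) =====
-- def get_trigger_sentence(tokens, trigger_start, trigger_end):
--     # Find the start and end of the sentence containing the trigger
--     sentence_start = trigger_start
--     while sentence_start > 0 and tokens[sentence_start - 1] not in ['.', '?', '!']:
--         sentence_start -= 1
--
--     sentence_end = trigger_end
--     while sentence_end < len(tokens) and tokens[sentence_end] not in ['.', '?', '!']:
--         sentence_end += 1
--
--     # Include the ending punctuation in the sentence
--     if sentence_end < len(tokens) and tokens[sentence_end] in ['.', '?', '!']: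
--         sentence_end += 1
--
--     return ' '.join(tokens[sentence_start:sentence_end])
-- ===== SOURCE B (Python) =====
-- import bisect
--
-- PUNCT = ('.', '?', '!')
--
--
-- def get_trigger_sentence(tokens, trigger_start, trigger_end):
--     # One pass builds the table of punctuation positions; two bisect lookups
--     # find the sentence boundaries around the trigger span.
--     punct_idx = [i for i, t in enumerate(tokens) if t in PUNCT]
--     j = bisect.bisect_left(punct_idx, trigger_start)
--     sentence_start = punct_idx[j - 1] + 1 if j > 0 else 0
--     k = bisect.bisect_left(punct_idx, trigger_end)
--     sentence_end = punct_idx[k] + 1 if k < len(punct_idx) else len(tokens)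
--     return ' '.join(tokens[sentence_start:sentence_end])
-- ===== Notes on version B (the rewrite author's own statement) =====
-- stated objective: alternative
-- what changed: Replaces A's two outward token-by-token scans from the trigger with a single pass building the sorted table of punctuation positions plus two bisect lookups; Pre_ excludes inputs where A raises IndexError and negative trigger indices, on which A's value comes from Python's negative-slice wraparound rather than any sentence logic.
-- outside the precondition, e.g. on get_trigger_sentence(['a', '.'], -1, 0): A returns '.', B returns 'a .'; on get_trigger_sentence(['a', '.', 'b'], -1, 1): A returns '', B returns 'a .'; on get_trigger_sentence(['a'], 3, 0): A raises IndexError, B returns 'a'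
import Mathlib
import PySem

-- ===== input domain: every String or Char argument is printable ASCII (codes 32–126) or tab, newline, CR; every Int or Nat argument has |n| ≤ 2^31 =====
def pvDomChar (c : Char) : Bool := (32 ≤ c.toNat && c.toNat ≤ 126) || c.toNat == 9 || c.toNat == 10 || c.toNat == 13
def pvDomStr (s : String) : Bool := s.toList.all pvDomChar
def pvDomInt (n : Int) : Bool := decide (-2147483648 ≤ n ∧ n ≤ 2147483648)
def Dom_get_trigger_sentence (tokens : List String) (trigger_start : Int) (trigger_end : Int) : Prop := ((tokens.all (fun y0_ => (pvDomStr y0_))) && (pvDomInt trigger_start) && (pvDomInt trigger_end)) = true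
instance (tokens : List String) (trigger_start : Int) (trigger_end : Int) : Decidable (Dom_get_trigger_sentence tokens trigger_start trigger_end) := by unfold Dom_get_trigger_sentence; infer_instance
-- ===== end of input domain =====

-- B replaces A's two outward token-by-token scans with a one-pass table of punctuation
-- positions plus two bisect lookups (alternative decomposition, same result).


-- ===== PORT A =====
def pvPunct : List String := [".", "?", "!"]

def pvIsPunct (t : String) : Bool := decide (t ∈ pvPunct)

-- while sentence_start > 0 and tokens[sentence_start - 1] not in ['.', '?', '!']
-- (fuel = trigger_start.toNat: the loop decrements sentence_start and stops at 0)
def pvA_findStart (tokens : List String) (ss : Int) : Nat → Int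
  | 0 => ss
  | fuel + 1 =>
    if ss > 0 && !(pvIsPunct (PySem.List.pyGetD tokens (ss - 1) "")) then
      pvA_findStart tokens (ss - 1) fuel
    else ss

-- while sentence_end < len(tokens) and tokens[sentence_end] not in ['.', '?', '!']
-- (fuel = (len(tokens) - trigger_end).toNat: the loop increments sentence_end up to len)
def pvA_findEnd (tokens : List String) (se : Int) : Nat → Int
  | 0 => se
  | fuel + 1 =>
    if se < PySem.List.len tokens && !(pvIsPunct (PySem.List.pyGetD tokens se "")) then
      pvA_findEnd tokens (se + 1) fuel
    else se

def get_trigger_sentence (tokens : List String) (trigger_start : Int) (trigger_end : Int) : String :=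
  let sentence_start := pvA_findStart tokens trigger_start trigger_start.toNat
  let sentence_end := pvA_findEnd tokens trigger_end (PySem.List.len tokens - trigger_end).toNat
  let sentence_end :=
    if sentence_end < PySem.List.len tokens && pvIsPunct (PySem.List.pyGetD tokens sentence_end "") then
      sentence_end + 1
    else sentence_end
  PySem.Str.join " " (PySem.List.slice tokens (some sentence_start) (some sentence_end))

-- ===== PORT B =====
-- punct_idx = [i for i, t in enumerate(tokens) if t in PUNCT]
def pvB_punctIdx (tokens : List String) : List Int :=
  (PySem.List.enumerate tokens 0).filterMap (fun it => if pvIsPunct it.2 then some it.1 else none)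

def get_trigger_sentence_alt (tokens : List String) (trigger_start : Int) (trigger_end : Int) : String :=
  let punct_idx := pvB_punctIdx tokens
  let j := PySem.List.bisectLeft punct_idx trigger_start
  let sentence_start : Int := if 0 < j then punct_idx.getD (j - 1) 0 + 1 else 0
  let k := PySem.List.bisectLeft punct_idx trigger_end
  let sentence_end : Int := if k < punct_idx.length then punct_idx.getD k 0 + 1 else PySem.List.len tokens
  PySem.Str.join " " (PySem.List.slice tokens (some sentence_start) (some sentence_end))

-- ===== PRECONDITION & SPEC =====
-- Pre_ excludes inputs where A raises IndexError (trigger_start > len(tokens) or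
-- trigger_end < -len(tokens)) and negative trigger indices on which A's value comes from
-- Python's negative-index/slice wraparound — an accident of A's implementation on inputs
-- that are not token spans; negative indices whose wraparound cannot affect the result
-- (trigger_start ≤ -len(tokens), or a negative trigger_end over punctuation-free tokens)
-- stay inside.
def Pre_get_trigger_sentence (tokens : List String) (trigger_start : Int) (trigger_end : Int) : Prop :=
  (0 ≤ trigger_start ∨ trigger_start ≤ -(tokens.length : Int)) ∧ trigger_start ≤ tokens.length ∧
    (0 ≤ trigger_end ∨ (-(tokens.length : Int) ≤ trigger_end ∧ tokens.all (fun t => !pvIsPunct t) = true))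

instance (tokens : List String) (trigger_start : Int) (trigger_end : Int) : Decidable (Pre_get_trigger_sentence tokens trigger_start trigger_end) := by unfold Pre_get_trigger_sentence; infer_instance

def pvWitness_get_trigger_sentence : List String × Int × Int := (["Hi", "there", ".", "A", "dog", "barked", "!", "End"], 4, 5)

def Spec_get_trigger_sentence (tokens : List String) (trigger_start : Int) (trigger_end : Int) (out : String) : Prop := out = get_trigger_sentence_alt tokens trigger_start trigger_end
instance (tokens : List String) (trigger_start : Int) (trigger_end : Int) (out : String) : Decidable (Spec_get_trigger_sentence tokens trigger_start trigger_end out) := by unfold Spec_get_trigger_sentence; infer_instance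

-- ===== CLAIM (what is proved, stated in full; the proofs are below) =====
def Claim_equal_get_trigger_sentence : Prop := ∀ (tokens : List String) (trigger_start : Int) (trigger_end : Int), Dom_get_trigger_sentence tokens trigger_start trigger_end → Pre_get_trigger_sentence tokens trigger_start trigger_end → Spec_get_trigger_sentence tokens trigger_start trigger_end (get_trigger_sentence tokens trigger_start trigger_end)

-- ===== LEMMAS AND PROOFS =====

-- q tokens k: token k is sentence-ending punctuation
def pvQ (tokens : List String) (k : Nat) : Bool := pvIsPunct (tokens.getD k "")

-- the punctuation positions below s
def pvCut (tokens : List String) (s : Nat) : List Nat := (List.range s).filter (pvQ tokens)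

-- the punctuation positions in [e, n)
def pvTail (tokens : List String) (e : Nat) : List Nat :=
  (List.range' e (tokens.length - e)).filter (pvQ tokens)

-- bisect_left on a ≤-sorted list counts the elements below the needle
theorem pvBisectLeft_eq_countP (xs : List Int) (x : Int) (h : xs.Pairwise (· ≤ ·)) :
    PySem.List.bisectLeft xs x = xs.countP (fun p => decide (p < x)) := by
  obtain ⟨hb, h1, h2⟩ := PySem.List.bisectLeft_spec xs x h
  set b := PySem.List.bisectLeft xs x with hbdef
  have hsplit : xs = xs.take b ++ xs.drop b := (List.take_append_drop _ _).symm
  rw [hsplit, List.countP_append]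
  have ht : (xs.take b).countP (fun p => decide (p < x)) = b := by
    rw [List.countP_eq_length.2, List.length_take, min_eq_left hb]
    intro a ha
    obtain ⟨i, hi, rfl⟩ := List.getElem_of_mem ha
    have hi2 : i < b ∧ i < xs.length := by simpa using hi
    rw [List.getElem_take]
    exact decide_eq_true (h1 i hi2.2 hi2.1)
  have hd : (xs.drop b).countP (fun p => decide (p < x)) = 0 := by
    rw [List.countP_eq_zero]
    intro a ha
    obtain ⟨i, hi, rfl⟩ := List.getElem_of_mem ha
    rw [List.getElem_drop]
    simp only [decide_eq_true_eq]
    exact not_lt.2 (h2 (b + i) (by simp at hi; omega) (by omega))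
  omega

theorem pvFilterMap_ite (l : List Nat) (p : Nat → Bool) (f : Nat → Int) :
    l.filterMap (fun k => if p k then some (f k) else none) = (l.filter p).map f := by
  induction l with
  | nil => rfl
  | cons a t ih => by_cases h : p a <;> simp [h, ih]

-- the B-side table is the cast of the filtered index range
theorem pvPunctIdx_eq (tokens : List String) :
    pvB_punctIdx tokens = (pvCut tokens tokens.length).map (Nat.cast) := by
  rw [pvB_punctIdx, PySem.List.enumerate_eq_map_pyRange tokens "", List.filterMap_map]
  rw [PySem.List.len_eq, PySem.List.pyRange_zero_nat, List.filterMap_map]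
  rw [pvCut, ← pvFilterMap_ite (List.range tokens.length) (pvQ tokens) Nat.cast]
  congr 1
  funext k
  simp [pvQ, Function.comp]

-- A's start loop computes "last punctuation below s, plus one, else 0"
theorem pvA_findStart_eq (tokens : List String) (s : Nat) :
    pvA_findStart tokens (s : Int) s =
      ((pvCut tokens s).getLast?.elim 0 (fun p => (p : Int) + 1)) := by
  induction s with
  | zero => simp [pvA_findStart, pvCut]
  | succ m ih =>
    rw [pvA_findStart]
    have hcast : ((m : Int) + 1) - 1 = (m : Int) := by omega
    have hget : PySem.List.pyGetD tokens (((m + 1 : Nat) : Int) - 1) "" = tokens.getD m "" := by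
      push_cast
      rw [hcast, PySem.List.pyGetD_natCast]
    have hcut : pvCut tokens (m + 1) = pvCut tokens m ++ if pvQ tokens m then [m] else [] := by
      simp [pvCut, List.range_succ, List.filter_append, List.filter_cons]
    by_cases h : pvQ tokens m
    · simp only [hget]
      rw [if_neg (by simp [pvQ] at h; simp [h])]
      rw [hcut, if_pos h]
      simp
    · simp only [hget]
      rw [if_pos (by simp [pvQ] at h; simp [h])]
      rw [hcut, if_neg h]
      push_cast
      rw [hcast]
      simpa using ih

-- A's end loop followed by the include step computes "first punctuation at or after e, plus one, else n"
theorem pvA_end_eq_aux (tokens : List String) (d : Nat) : ∀ e : Nat, e + d = tokens.length →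
    (let se := pvA_findEnd tokens (e : Int) d
     if se < PySem.List.len tokens && pvIsPunct (PySem.List.pyGetD tokens se "") then se + 1 else se) =
      ((pvTail tokens e).head?.elim (tokens.length : Int) (fun p => (p : Int) + 1)) := by
  induction d with
  | zero =>
    intro e he
    simp only [pvA_findEnd]
    rw [if_neg (by simp; omega)]
    have h0 : pvTail tokens e = [] := by simp [pvTail, show tokens.length - e = 0 by omega]
    simp [h0]
    omega
  | succ m ih =>
    intro e he
    have hlen : ((e : Nat) : Int) < PySem.List.len tokens := by
      rw [PySem.List.len_eq]; exact_mod_cast (by omega : e < tokens.length)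
    have hcond : (decide (((e : Nat) : Int) < PySem.List.len tokens) &&
        !(pvIsPunct (PySem.List.pyGetD tokens ((e : Nat) : Int) ""))) = !(pvQ tokens e) := by
      rw [decide_eq_true hlen, Bool.true_and, PySem.List.pyGetD_natCast]; rfl
    have hc2 : (decide (((e : Nat) : Int) < PySem.List.len tokens) &&
        pvIsPunct (PySem.List.pyGetD tokens ((e : Nat) : Int) "")) = pvQ tokens e := by
      rw [decide_eq_true hlen, Bool.true_and, PySem.List.pyGetD_natCast]; rfl
    have hrange : pvTail tokens e = ((e : Nat) :: List.range' (e + 1) m).filter (pvQ tokens) := by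
      rw [pvTail, show tokens.length - e = m + 1 by omega, List.range'_succ]
    by_cases h : pvQ tokens e
    · simp only [pvA_findEnd, hcond, h, Bool.not_true, Bool.false_eq_true, if_false, hc2, if_true]
      rw [hrange, List.filter_cons_of_pos h]
      simp
    · simp only [pvA_findEnd, hcond, h, Bool.not_false, if_true]
      rw [show ((e : Nat) : Int) + 1 = (((e + 1 : Nat) : Int)) by push_cast; ring]
      rw [hrange, List.filter_cons_of_neg (by simp [h])]
      have hih := ih (e + 1) (by omega)
      simp only [pvTail, show tokens.length - (e + 1) = m by omega] at hih
      exact hih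

-- the table splits at any s ≤ n into the part below s and the part from s on
theorem pvCut_split (tokens : List String) (s : Nat) (hs : s ≤ tokens.length) :
    pvCut tokens tokens.length = pvCut tokens s ++ pvTail tokens s := by
  rw [pvCut, pvCut, pvTail, ← List.filter_append]
  congr 1
  rw [List.range_eq_range', List.range_eq_range']
  have h : List.range' 0 s ++ List.range' s (tokens.length - s) = List.range' 0 tokens.length := by
    have h0 := @List.range'_append 0 s (tokens.length - s) 1
    simp only [Nat.one_mul, Nat.zero_add] at h0
    rw [h0, Nat.add_sub_cancel' hs]
  rw [h]

theorem pvCut_sorted (tokens : List String) (s : Nat) :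
    ((pvCut tokens s).map (Nat.cast : Nat → Int)).Pairwise (· ≤ ·) := by
  exact List.Pairwise.map _ (fun a b hab => by exact_mod_cast hab)
    (((List.pairwise_lt_range).filter _).imp (fun h => le_of_lt h))

-- bisect into the table at a needle s ≤ n lands at the size of the below-s part
theorem pvBisect_cut (tokens : List String) (s : Nat) (hs : s ≤ tokens.length) :
    PySem.List.bisectLeft ((pvCut tokens tokens.length).map (Nat.cast : Nat → Int)) (s : Int) =
      (pvCut tokens s).length := by
  rw [pvBisectLeft_eq_countP _ _ (pvCut_sorted tokens tokens.length)]
  rw [List.countP_map, pvCut_split tokens s hs, List.countP_append]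
  have h1 : (pvCut tokens s).countP ((fun p => decide (p < (s : Int))) ∘ Nat.cast) =
      (pvCut tokens s).length := by
    rw [List.countP_eq_length.2]
    intro a ha
    have : a < s := List.mem_range.1 (List.mem_of_mem_filter ha)
    simp [Function.comp]
    exact_mod_cast this
  have h2 : (pvTail tokens s).countP ((fun p => decide (p < (s : Int))) ∘ Nat.cast) = 0 := by
    rw [List.countP_eq_zero]
    intro a ha
    have : s ≤ a := by
      have := List.mem_of_mem_filter ha
      rw [List.mem_range'] at this
      omega
    simp [Function.comp]
    exact_mod_cast this
  omega

-- a needle at or past n lands at the end of the table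
theorem pvBisect_past (tokens : List String) (x : Int) (hx : (tokens.length : Int) ≤ x) :
    PySem.List.bisectLeft ((pvCut tokens tokens.length).map (Nat.cast : Nat → Int)) x =
      (pvCut tokens tokens.length).length := by
  rw [pvBisectLeft_eq_countP _ _ (pvCut_sorted tokens tokens.length), List.countP_map]
  exact List.countP_eq_length.2 (fun a ha => by
    have : a < tokens.length := List.mem_range.1 (List.mem_of_mem_filter ha)
    simp [Function.comp]
    omega)

-- B's start lookup agrees with "last punctuation below s, plus one, else 0"
theorem pvB_start_eq (tokens : List String) (s : Nat) (hs : s ≤ tokens.length) :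
    (if 0 < (pvCut tokens s).length then
       (((pvCut tokens tokens.length).map (Nat.cast : Nat → Int)).getD ((pvCut tokens s).length - 1) 0) + 1
     else 0) = ((pvCut tokens s).getLast?.elim 0 (fun p => (p : Int) + 1)) := by
  by_cases h : pvCut tokens s = []
  · simp [h]
  · have hl : 0 < (pvCut tokens s).length := List.length_pos_iff.2 h
    rw [if_pos hl, pvCut_split tokens s hs, List.map_append]
    rw [List.getD_eq_getElem?_getD, List.getElem?_append_left (by simp; omega)]
    rw [List.getElem?_map, List.getElem?_eq_getElem (by omega), List.getLast?_eq_getElem?,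
      List.getElem?_eq_getElem (by omega)]
    simp

-- B's end lookup agrees with "first punctuation at or after e, plus one, else n"
theorem pvB_end_eq (tokens : List String) (e : Nat) (he : e ≤ tokens.length) :
    (if (pvCut tokens e).length < ((pvCut tokens tokens.length).map (Nat.cast : Nat → Int)).length then
       (((pvCut tokens tokens.length).map (Nat.cast : Nat → Int)).getD ((pvCut tokens e).length) 0) + 1
     else PySem.List.len tokens) =
      ((pvTail tokens e).head?.elim (tokens.length : Int) (fun p => (p : Int) + 1)) := by
  have hsplit := pvCut_split tokens e he
  by_cases h : pvTail tokens e = []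
  · rw [if_neg (by simp [hsplit, h]), PySem.List.len_eq]
    simp [h]
  · have hpos : 0 < (pvTail tokens e).length := List.length_pos_iff.2 h
    rw [if_pos (by simp [hsplit]; omega)]
    rw [hsplit, List.map_append, List.getD_eq_getElem?_getD,
      List.getElem?_append_right (by simp)]
    rw [List.length_map, Nat.sub_self, List.getElem?_map, List.getElem?_eq_getElem (by omega)]
    rw [List.head?_eq_getElem?, List.getElem?_eq_getElem (by omega)]
    simp

-- a slice end at or past the length clamps to the length
theorem pvSlice_clamp {α : Type} (xs : List α) (a b : Int)
    (hb : (xs.length : Int) ≤ b) :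
    PySem.List.slice xs (some a) (some b) =
      PySem.List.slice xs (some a) (some ((xs.length : Nat) : Int)) := by
  simp only [PySem.List.slice]
  have h1 : PySem.List.clampIdx xs.length b = xs.length := by
    simp only [PySem.List.clampIdx]
    rw [if_neg (by omega)]
    omega
  have h2 : PySem.List.clampIdx xs.length ((xs.length : Nat) : Int) = xs.length := by
    simp only [PySem.List.clampIdx]
    rw [if_neg (by omega)]
    omega
  rw [h1, h2]

-- a negative needle lands at the front of the table
theorem pvBisect_neg (tokens : List String) (x : Int) (hx : x < 0) :
    PySem.List.bisectLeft ((pvCut tokens tokens.length).map (Nat.cast : Nat → Int)) x = 0 := by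
  rw [pvBisectLeft_eq_countP _ _ (pvCut_sorted tokens tokens.length), List.countP_map]
  rw [List.countP_eq_zero]
  intro a _
  simp [Function.comp]
  omega

-- a slice start at or below -length clamps to 0
theorem pvSlice_clamp_start {α : Type} (xs : List α) (a b : Int)
    (ha : a ≤ -(xs.length : Int)) :
    PySem.List.slice xs (some a) (some b) =
      PySem.List.slice xs (some 0) (some b) := by
  simp only [PySem.List.slice]
  have h1 : PySem.List.clampIdx xs.length a = 0 := by
    simp only [PySem.List.clampIdx]
    split_ifs <;> omega
  have h2 : PySem.List.clampIdx xs.length (0 : Int) = 0 := by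
    simp only [PySem.List.clampIdx]
    split_ifs <;> omega
  rw [h1, h2]

-- on punctuation-free tokens no position is sentence-ending
theorem pvQ_false (tokens : List String) (h : tokens.all (fun t => !pvIsPunct t) = true)
    (k : Nat) : pvQ tokens k = false := by
  rw [pvQ]
  by_cases hk : k < tokens.length
  · have hm : tokens.getD k "" ∈ tokens := by
      rw [List.getD_eq_getElem?_getD, List.getElem?_eq_getElem hk]
      exact List.getElem_mem hk
    simpa using (List.all_eq_true.1 h _ hm)
  · rw [List.getD_eq_getElem?_getD, List.getElem?_eq_none (by omega)]
    decide

-- on punctuation-free tokens the table is empty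
theorem pvCut_nil (tokens : List String) (h : tokens.all (fun t => !pvIsPunct t) = true)
    (s : Nat) : pvCut tokens s = [] := by
  rw [pvCut, List.filter_eq_nil_iff]
  intro a _
  simp [pvQ_false tokens h a]

-- on punctuation-free tokens A's end loop runs its whole fuel and stops at the length
theorem pvA_findEnd_nopunct (tokens : List String)
    (h : tokens.all (fun t => !pvIsPunct t) = true) (fuel : Nat) :
    ∀ se : Int, -(tokens.length : Int) ≤ se → se + fuel = tokens.length →
      pvA_findEnd tokens se fuel = (tokens.length : Int) := by
  induction fuel with
  | zero => intro se _ hse; simpa [pvA_findEnd] using (by omega : se = (tokens.length : Int))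
  | succ m ih =>
    intro se hge hse
    have hlt : se < PySem.List.len tokens := by rw [PySem.List.len_eq]; omega
    have hmem : PySem.List.pyGetD tokens se "" ∈ tokens := by
      apply PySem.List.pyGetD_mem
      constructor <;> [omega; (rw [← PySem.List.len_eq]; exact hlt)]
    have hnp : pvIsPunct (PySem.List.pyGetD tokens se "") = false := by
      simpa using (List.all_eq_true.1 h _ hmem)
    rw [pvA_findEnd, if_pos (by rw [hnp, decide_eq_true hlt]; rfl)]
    exact ih (se + 1) (by omega) (by omega)

-- ===== VERDICT (by name: the statement is the Claim_ definition above) =====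
theorem get_trigger_sentence_spec : Claim_equal_get_trigger_sentence := by
  intro tokens ts te _ hpre
  obtain ⟨hts, hlen, hte⟩ := hpre
  unfold Spec_get_trigger_sentence get_trigger_sentence get_trigger_sentence_alt
  simp only [pvPunctIdx_eq]
  -- the start boundaries give the same slice, whatever the end is
  have hstart : ∀ b : Int,
      PySem.List.slice tokens (some (pvA_findStart tokens ts ts.toNat)) (some b) =
      PySem.List.slice tokens
        (some (if 0 < PySem.List.bisectLeft ((pvCut tokens tokens.length).map (Nat.cast : Nat → Int)) ts then
          (((pvCut tokens tokens.length).map (Nat.cast : Nat → Int)).getD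
            (PySem.List.bisectLeft ((pvCut tokens tokens.length).map (Nat.cast : Nat → Int)) ts - 1) 0) + 1
        else 0)) (some b) := by
    intro b
    by_cases h0 : 0 ≤ ts
    · obtain ⟨s, rfl⟩ : ∃ s : Nat, ts = (s : Int) := ⟨ts.toNat, (Int.toNat_of_nonneg h0).symm⟩
      have hs : s ≤ tokens.length := by exact_mod_cast hlen
      rw [Int.toNat_natCast, pvA_findStart_eq, pvBisect_cut tokens s hs, pvB_start_eq tokens s hs]
    · have hneg : ts < 0 := by omega
      have hlow : ts ≤ -(tokens.length : Int) := hts.resolve_left h0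
      rw [show ts.toNat = 0 from Int.toNat_of_nonpos (le_of_lt hneg)]
      rw [pvBisect_neg tokens ts hneg, if_neg (by omega)]
      exact pvSlice_clamp_start tokens ts b hlow
  rw [hstart]
  generalize (if 0 < PySem.List.bisectLeft ((pvCut tokens tokens.length).map (Nat.cast : Nat → Int)) ts then
      (((pvCut tokens tokens.length).map (Nat.cast : Nat → Int)).getD
        (PySem.List.bisectLeft ((pvCut tokens tokens.length).map (Nat.cast : Nat → Int)) ts - 1) 0) + 1
    else (0 : Int)) = s
  by_cases h0 : 0 ≤ te
  · by_cases hle2 : te ≤ (tokens.length : Int)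
    · obtain ⟨e, rfl⟩ : ∃ e : Nat, te = (e : Int) := ⟨te.toNat, (Int.toNat_of_nonneg h0).symm⟩
      have heN : e ≤ tokens.length := by exact_mod_cast hle2
      have hk := pvBisect_cut tokens e heN
      have hfuel : ((PySem.List.len tokens) - (e : Int)).toNat = tokens.length - e := by
        rw [PySem.List.len_eq]; omega
      have hendA := pvA_end_eq_aux tokens (tokens.length - e) e (by omega)
      simp only at hendA
      rw [hfuel, hendA, hk, pvB_end_eq tokens e heN]
    · have hte2 : (tokens.length : Int) < te := lt_of_not_ge hle2
      have hfuel : ((PySem.List.len tokens) - te).toNat = 0 := by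
        rw [PySem.List.len_eq]; omega
      rw [hfuel]
      simp only [pvA_findEnd]
      rw [if_neg (by simp [PySem.List.len_eq]; intro hlt; exact absurd hlt (by omega))]
      have hk := pvBisect_past tokens te (le_of_lt hte2)
      rw [hk, if_neg (show ¬((pvCut tokens tokens.length).length <
        ((pvCut tokens tokens.length).map (Nat.cast : Nat → Int)).length) by simp)]
      rw [PySem.List.len_eq, pvSlice_clamp tokens _ te (by omega)]
  · obtain ⟨hge, hnp⟩ := hte.resolve_left h0
    have hfuelE : te + (((PySem.List.len tokens) - te).toNat : Int) = tokens.length := by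
      rw [PySem.List.len_eq]; omega
    rw [pvA_findEnd_nopunct tokens hnp _ te (by omega) (by exact_mod_cast hfuelE)]
    rw [if_neg (by rw [PySem.List.len_eq]; simp)]
    rw [pvCut_nil tokens hnp]
    simp only [List.map_nil, List.length_nil, PySem.List.len_eq]
    rw [if_neg (Nat.not_lt_zero _)]
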